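-- pv_equiv track=rewrite | github.com/mgb56/phraise | backend/translator.py | count_leading_and_trailing_whitespace
-- ===== SOURCE A (Python) =====
-- def count_leading_and_trailing_whitespace(sentence):
--     saw_char = False
--     num_left_spaces = 0
--     num_right_spaces = 0
--
--     i = 0
--     while i < len(sentence):
--         if sentence[i].isalnum():
--             break
--         else:
--             num_left_spaces += 1
--         i += 1
--
--     i = len(sentence) - 1
--     while i >= 0:
--         if sentence[i].isalnum():
--             break
--         else:
--             num_right_spaces += 1
--         i -= 1
--
--     return (num_left_spaces, num_right_spaces)
-- ===== SOURCE B (Python) =====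
-- def count_leading_and_trailing_whitespace(sentence):
--     first = None
--     last = None
--     for i, c in enumerate(sentence):
--         if c.isalnum():
--             if first is None:
--                 first = i
--             last = i
--     n = len(sentence)
--     if first is None:
--         return (n, n)
--     return (first, n - 1 - last)
-- ===== Notes on version B (the rewrite author's own statement) =====
-- stated objective: alternative
-- what changed: Replaced A's two opposite-direction partial scans with a single forward pass (enumerate) that records the first and last alphanumeric index, the two counts then following by index arithmetic.
import Mathlib
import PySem

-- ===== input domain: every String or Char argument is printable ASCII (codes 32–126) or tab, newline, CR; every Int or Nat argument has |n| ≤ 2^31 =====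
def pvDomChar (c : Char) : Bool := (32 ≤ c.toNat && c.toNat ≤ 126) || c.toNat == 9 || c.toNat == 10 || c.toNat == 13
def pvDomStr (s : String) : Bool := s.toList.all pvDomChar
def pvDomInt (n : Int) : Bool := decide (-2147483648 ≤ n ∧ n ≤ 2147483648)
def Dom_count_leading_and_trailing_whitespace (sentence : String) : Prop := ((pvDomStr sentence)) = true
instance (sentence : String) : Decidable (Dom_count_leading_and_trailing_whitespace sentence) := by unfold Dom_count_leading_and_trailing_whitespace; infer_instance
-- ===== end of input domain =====

-- B replaces A's two opposite-direction partial scans by one forward pass recording the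
-- first and last alphanumeric index (objective: alternative decomposition, same cost).

-- ===== PORT A =====
-- A's while loop: count characters until the first alphanumeric one (break), else all of them.
-- The second loop runs the same scan from the end, i.e. this scan over the reversed list.
def pvScanA (l : List Char) : Int :=
  match l with
  | [] => 0
  | c :: t => if PySem.Chars.isalnum c then 0 else 1 + pvScanA t

def count_leading_and_trailing_whitespace (sentence : String) : Int × Int :=
  (pvScanA sentence.toList, pvScanA sentence.toList.reverse)

-- ===== PORT B =====
-- one step of B's for-loop: update (first, last) on an (index, char) pair
def pvStepB (acc : Option Int × Option Int) (ic : Int × Char) : Option Int × Option Int :=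
  if PySem.Chars.isalnum ic.2 then
    ((if acc.1.isNone then some ic.1 else acc.1), some ic.1)
  else acc

def count_leading_and_trailing_whitespace_alt (sentence : String) : Int × Int :=
  let n : Int := PySem.Str.len sentence
  match (PySem.List.enumerate sentence.toList 0).foldl pvStepB (none, none) with
  | (some f, some l) => (f, n - 1 - l)
  | _ => (n, n)

-- ===== PRECONDITION & SPEC =====
def Spec_count_leading_and_trailing_whitespace (sentence : String) (out : Int × Int) : Prop := out = count_leading_and_trailing_whitespace_alt sentence
instance (sentence : String) (out : Int × Int) : Decidable (Spec_count_leading_and_trailing_whitespace sentence out) := by unfold Spec_count_leading_and_trailing_whitespace; infer_instance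

-- ===== CLAIM (what is proved, stated in full; the proofs are below) =====
def Claim_equal_count_leading_and_trailing_whitespace : Prop := ∀ (sentence : String), Dom_count_leading_and_trailing_whitespace sentence → Spec_count_leading_and_trailing_whitespace sentence (count_leading_and_trailing_whitespace sentence)

-- ===== LEMMAS AND PROOFS =====

-- index of the first alphanumeric character, as an Int
def pvFirst (l : List Char) : Option Int :=
  match l with
  | [] => none
  | c :: t => if PySem.Chars.isalnum c then some 0 else (pvFirst t).map (· + 1)

-- index of the last alphanumeric character, as an Int
def pvLast (l : List Char) : Option Int :=
  match l with
  | [] => none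
  | c :: t =>
    match pvLast t with
    | some j => some (j + 1)
    | none => if PySem.Chars.isalnum c then some 0 else none

theorem pvFoldB_spec (l : List Char) (k : Int) (f0 l0 : Option Int) :
    (PySem.List.enumerate l k).foldl pvStepB (f0, l0) =
      ((if f0.isNone then (pvFirst l).map (· + k) else f0),
       match pvLast l with
       | some j => some (j + k)
       | none => l0) := by
  induction l generalizing k f0 l0 with
  | nil => cases f0 <;> simp [PySem.List.enumerate_nil, pvFirst, pvLast]
  | cons c t ih =>
    rw [PySem.List.enumerate_cons, List.foldl_cons, ih]
    by_cases hc : PySem.Chars.isalnum c = true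
    · cases f0 with
      | none =>
        simp only [pvStepB, hc, if_pos, pvFirst, pvLast, Option.isNone_none, if_true]
        cases ht : pvLast t with
        | none => simp [hc]
        | some j => simp [hc]; ring
      | some f =>
        simp only [pvStepB, hc, if_pos, pvFirst, pvLast, Option.isNone_some, if_false,
          Bool.false_eq_true]
        cases ht : pvLast t with
        | none => simp [hc]
        | some j => simp [hc]; ring
    · simp only [pvStepB, hc, if_neg, pvFirst, pvLast, Bool.false_eq_true, if_false]
      cases f0 with
      | none =>
        cases hf : pvFirst t with
        | none =>
          cases ht : pvLast t with
          | none => simp [hc]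
          | some j => simp; ring
        | some i =>
          cases ht : pvLast t with
          | none => simp [hc]; ring
          | some j => refine Prod.ext ?_ ?_ <;> simp <;> ring
      | some f =>
        cases ht : pvLast t with
        | none => simp [hc]
        | some j => simp; ring

theorem pvScanA_eq_first (l : List Char) :
    pvScanA l = match pvFirst l with
                | some i => i
                | none => (l.length : Int) := by
  induction l with
  | nil => simp [pvScanA, pvFirst]
  | cons c t ih =>
    by_cases hc : PySem.Chars.isalnum c = true
    · simp [pvScanA, pvFirst, hc]
    · simp only [pvScanA, pvFirst, hc, Bool.false_eq_true, if_false]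
      cases hf : pvFirst t with
      | none => rw [ih]; simp [hf]; push_cast; ring
      | some i => rw [ih]; simp [hf]; ring

theorem pvFirst_append (a b : List Char) :
    pvFirst (a ++ b) = match pvFirst a with
                       | some i => some i
                       | none => (pvFirst b).map (· + (a.length : Int)) := by
  induction a with
  | nil => simp [pvFirst]
  | cons c t ih =>
    by_cases hc : PySem.Chars.isalnum c = true
    · simp [pvFirst, hc]
    · simp only [List.cons_append, pvFirst, hc, Bool.false_eq_true, if_false, ih]
      cases hf : pvFirst t with
      | none =>
        cases hb : pvFirst b with
        | none => simp
        | some j => simp; push_cast; ring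
      | some i => simp

theorem pvFirst_reverse (l : List Char) :
    pvFirst l.reverse = (pvLast l).map (fun j => (l.length : Int) - 1 - j) := by
  induction l with
  | nil => simp [pvFirst, pvLast]
  | cons c t ih =>
    rw [List.reverse_cons, pvFirst_append, ih]
    cases ht : pvLast t with
    | none =>
      by_cases hc : PySem.Chars.isalnum c = true <;>
        simp [pvFirst, pvLast, hc, ht] <;> push_cast <;> ring
    | some j => simp [pvLast, ht]; push_cast; ring

theorem pvFirst_none_iff_last_none (l : List Char) :
    pvFirst l = none ↔ pvLast l = none := by
  induction l with
  | nil => simp [pvFirst, pvLast]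
  | cons c t ih =>
    by_cases hc : PySem.Chars.isalnum c = true
    · simp only [pvFirst, pvLast, hc, if_pos]
      cases ht : pvLast t with
      | none => simp
      | some j => simp
    · simp only [pvFirst, pvLast, hc, Bool.false_eq_true, if_false]
      cases ht : pvLast t with
      | none => simp [ih.mpr ht, ht]
      | some j =>
        have : pvFirst t ≠ none := fun h => by simp [ih.mp h] at ht
        cases hf : pvFirst t with
        | none => exact absurd hf this
        | some i => simp

-- ===== VERDICT (by name: the statement is the Claim_ definition above) =====
theorem count_leading_and_trailing_whitespace_spec : Claim_equal_count_leading_and_trailing_whitespace := by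
  intro s _
  unfold Spec_count_leading_and_trailing_whitespace
  unfold count_leading_and_trailing_whitespace count_leading_and_trailing_whitespace_alt
  rw [pvFoldB_spec]
  have hlen : PySem.Str.len s = (s.toList.length : Int) := by
    simp [PySem.Str.len, PySem.Chars.len]
  cases hl : pvLast s.toList with
  | none =>
    have hf : pvFirst s.toList = none := (pvFirst_none_iff_last_none _).mpr hl
    have h1 : pvScanA s.toList = (s.toList.length : Int) := by
      rw [pvScanA_eq_first, hf]
    have h2 : pvScanA s.toList.reverse = (s.toList.length : Int) := by
      rw [pvScanA_eq_first, pvFirst_reverse, hl]; simp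
    simp [h1, h2, hf, hlen]
  | some j =>
    have hf : pvFirst s.toList ≠ none := fun h => by
      simp [(pvFirst_none_iff_last_none _).mp h] at hl
    cases hfe : pvFirst s.toList with
    | none => exact absurd hfe hf
    | some i =>
      have h1 : pvScanA s.toList = i := by rw [pvScanA_eq_first, hfe]
      have h2 : pvScanA s.toList.reverse = (s.toList.length : Int) - 1 - j := by
        rw [pvScanA_eq_first, pvFirst_reverse, hl]; simp
      simp [h1, h2, hfe, hlen]
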